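-- pv_equiv track=rewrite | github.com/datacommonsorg/data | scripts/us_eia/cbecs/process.py | get_camelcase_alnum_string
-- ===== SOURCE A (Python) =====
-- def get_camelcase_alnum_string(input_string: str) -> str:
--     '''Returns a capitalized string with only alphabets or numbers.
--     Example: "Abc-def(HG-123)" -> "AbcDefHG"
--     '''
--     # strip out paranthesis
--     paranthesis_pos = input_string.find('(')
--     if paranthesis_pos > 0:
--         input_string = input_string[:paranthesis_pos]
--     # replace any non-alpha characters with space
--     clean_str = [s if s.isalnum() else ' ' for s in input_string]
--     joined_str = ''.join(clean_str)
--     # split by space and capitalise first letter, preserving any other capitals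
--     return ''.join(
--         [w[0].upper() + w[1:] for w in joined_str.split(' ') if len(w) > 0])
-- ===== SOURCE B (Python) =====
-- def get_camelcase_alnum_string(input_string: str) -> str:
--     '''Returns a capitalized string with only alphabets or numbers.'''
--     paranthesis_pos = input_string.find('(')
--     if paranthesis_pos > 0:
--         input_string = input_string[:paranthesis_pos]
--     # single pass: uppercase the first alnum char of each run, drop the rest
--     out = []
--     new_word = True
--     for c in input_string:
--         if c.isalnum():
--             out.append(c.upper() if new_word else c)
--             new_word = False
--         else:
--             new_word = True
--     return ''.join(out)
-- ===== Notes on version B (the rewrite author's own statement) =====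
-- stated objective: simpler
-- what changed: Replaced the replace-to-spaces / join / split-on-space / capitalize-each-word / join pipeline by one pass over the (possibly truncated) string with a new_word flag that uppercases the first alphanumeric of each run and skips separators.
import Mathlib
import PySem

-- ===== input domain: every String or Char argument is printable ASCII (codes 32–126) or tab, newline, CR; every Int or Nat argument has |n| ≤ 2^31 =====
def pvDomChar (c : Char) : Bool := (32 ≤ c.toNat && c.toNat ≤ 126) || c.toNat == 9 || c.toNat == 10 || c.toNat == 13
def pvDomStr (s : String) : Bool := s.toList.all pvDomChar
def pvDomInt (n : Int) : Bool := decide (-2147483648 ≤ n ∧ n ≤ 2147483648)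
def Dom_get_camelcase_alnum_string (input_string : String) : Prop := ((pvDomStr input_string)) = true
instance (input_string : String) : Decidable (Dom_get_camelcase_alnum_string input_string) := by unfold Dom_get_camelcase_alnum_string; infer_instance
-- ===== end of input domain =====

-- B replaces A's replace/join/split/capitalize pipeline by a single pass with a new_word flag (objective: simpler).

-- ===== PORT A =====
-- 's if s.isalnum() else ' '' from A's list comprehension
def pvCleanChar (c : Char) : Char := if PySem.Chars.isalnum c then c else ' '

-- 'w[0].upper() + w[1:]' (A only applies it to nonempty w; [] case unreachable there)
def pvCap (w : List Char) : List Char :=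
  match w with
  | [] => []
  | c :: r => PySem.Chars.upperChar c :: r

def get_camelcase_alnum_string (input_string : String) : String :=
  let cs := input_string.toList
  let paranthesis_pos := PySem.Chars.find cs ['(']
  let cs := if paranthesis_pos > 0 then PySem.List.slice cs none (some paranthesis_pos) else cs
  let clean_str := cs.map pvCleanChar
  let joined_str := clean_str
  let words := PySem.Chars.splitOn joined_str [' ']
  String.ofList (PySem.Chars.join [] ((words.filter (fun w => 0 < w.length)).map pvCap))

-- ===== PORT B =====
-- the for-loop of Source B: buffer built in order, new_word flag threaded through
def pvCamelLoop (cs : List Char) (newWord : Bool) : List Char :=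
  match cs with
  | [] => []
  | c :: rest =>
    if PySem.Chars.isalnum c then
      (if newWord then PySem.Chars.upperChar c else c) :: pvCamelLoop rest false
    else
      pvCamelLoop rest true

def get_camelcase_alnum_string_alt (input_string : String) : String :=
  let cs := input_string.toList
  let paranthesis_pos := PySem.Chars.find cs ['(']
  let cs := if paranthesis_pos > 0 then PySem.List.slice cs none (some paranthesis_pos) else cs
  String.ofList (pvCamelLoop cs true)

-- ===== PRECONDITION & SPEC =====
def Spec_get_camelcase_alnum_string (input_string : String) (out : String) : Prop := out = get_camelcase_alnum_string_alt input_string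
instance (input_string : String) (out : String) : Decidable (Spec_get_camelcase_alnum_string input_string out) := by unfold Spec_get_camelcase_alnum_string; infer_instance

-- ===== CLAIM (what is proved, stated in full; the proofs are below) =====
def Claim_equal_get_camelcase_alnum_string : Prop := ∀ (input_string : String), Dom_get_camelcase_alnum_string input_string → Spec_get_camelcase_alnum_string input_string (get_camelcase_alnum_string input_string)

-- ===== LEMMAS AND PROOFS =====

-- simple structural recursion equivalent to splitting on a single space
def pvSplitSp (cs : List Char) : List (List Char) :=
  match cs with
  | [] => [[]]
  | c :: rest =>
    if c = ' ' then [] :: pvSplitSp rest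
    else (pvSplitSp rest).modifyHead (c :: ·)

theorem pvSplitSp_ne_nil (l : List Char) : pvSplitSp l ≠ [] := by
  induction l with
  | nil => simp [pvSplitSp]
  | cons c r ih =>
    simp only [pvSplitSp]; split
    · simp
    · cases h : pvSplitSp r with
      | nil => exact absurd h ih
      | cons x xs => simp

theorem modifyHead_id_eq {α : Type} (l : List α) : l.modifyHead (fun x => x) = l := by
  cases l <;> simp

theorem splitOn_go_eq (l : List Char) : ∀ (fuel : Nat), l.length ≤ fuel →
    ∀ (cur : List Char) (acc : List (List Char)),
    PySem.Chars.splitOn.go [' '] fuel l cur acc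
      = acc.reverse ++ (pvSplitSp l).modifyHead (cur.reverse ++ ·) := by
  induction l with
  | nil =>
    intro fuel _ cur acc
    cases fuel <;> simp [PySem.Chars.splitOn.go, pvSplitSp]
  | cons c rest ih =>
    intro fuel hf cur acc
    cases fuel with
    | zero => simp at hf
    | succ f =>
      have hf' : rest.length ≤ f := by simpa using hf
      by_cases hc : c = ' '
      · subst hc
        simp only [PySem.Chars.splitOn.go, List.isPrefixOf, BEq.beq]
        simp [ih f hf', pvSplitSp, modifyHead_id_eq]
      · have hpre : ([' '] : List Char).isPrefixOf (c :: rest) = false := by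
          simp [List.isPrefixOf]
          intro h; exact absurd h.symm hc
        simp only [PySem.Chars.splitOn.go, hpre]
        rw [if_neg (by simp)]
        rw [ih f hf' (c :: cur) acc]
        simp [pvSplitSp, hc]
        cases pvSplitSp rest <;> simp

theorem splitOn_eq_pvSplitSp (cs : List Char) :
    PySem.Chars.splitOn cs [' '] = pvSplitSp cs := by
  have := splitOn_go_eq cs (cs.length + 1) (by omega) [] []
  simpa [PySem.Chars.splitOn, modifyHead_id_eq] using this
  
theorem join_nil_eq_flatten (l : List (List Char)) :
    PySem.Chars.join [] l = l.flatten := by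
  induction l with
  | nil => simp [PySem.Chars.join, List.intercalate]
  | cons x xs ih =>
    cases xs with
    | nil => simp [PySem.Chars.join, List.intercalate]
    | cons y ys =>
      simp only [PySem.Chars.join, List.intercalate, List.intersperse] at *
      simp_all

theorem flatten_cap_filter (l : List (List Char)) :
    ((l.filter (fun w => 0 < w.length)).map pvCap).flatten = (l.map pvCap).flatten := by
  induction l with
  | nil => rfl
  | cons w ws ih =>
    cases w with
    | nil => simpa [pvCap] using ih
    | cons c r => simp [List.filter, ih]

theorem pvCamelLoop_eq (cs : List Char) :
    pvCamelLoop cs true = ((pvSplitSp (cs.map pvCleanChar)).map pvCap).flatten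
  ∧ pvCamelLoop cs false
      = (pvSplitSp (cs.map pvCleanChar)).headD []
        ++ (((pvSplitSp (cs.map pvCleanChar)).tail).map pvCap).flatten := by
  induction cs with
  | nil => simp [pvCamelLoop, pvSplitSp, pvCap]
  | cons c rest ih =>
    obtain ⟨ih1, ih2⟩ := ih
    by_cases ha : PySem.Chars.isalnum c = true
    · have hcs : c ≠ ' ' := by
        intro h; subst h
        exact absurd ha (by decide)
      have hclean : pvCleanChar c = c := by simp [pvCleanChar, ha]
      simp only [List.map_cons, hclean, pvSplitSp, if_neg hcs]
      rcases hsp : pvSplitSp (rest.map pvCleanChar) with _ | ⟨h, t⟩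
      · exact absurd hsp (pvSplitSp_ne_nil _)
      · constructor
        · simp [pvCamelLoop, ha, ih2, hsp, pvCap]
        · simp [pvCamelLoop, ha, ih2, hsp]
    · have hclean : pvCleanChar c = ' ' := by simp [pvCleanChar, ha]
      simp only [List.map_cons, hclean, pvSplitSp, if_pos]
      constructor
      · simp [pvCamelLoop, ha, ih1, pvCap]
      · simp [pvCamelLoop, ha, ih1]

theorem main_lemma (cs : List Char) :
    PySem.Chars.join []
        (((PySem.Chars.splitOn (cs.map pvCleanChar) [' ']).filter (fun w => 0 < w.length)).map pvCap)
      = pvCamelLoop cs true := by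
  rw [join_nil_eq_flatten, splitOn_eq_pvSplitSp, flatten_cap_filter, (pvCamelLoop_eq cs).1]

-- ===== VERDICT (by name: the statement is the Claim_ definition above) =====
theorem get_camelcase_alnum_string_spec : Claim_equal_get_camelcase_alnum_string := by
  intro s _
  unfold Spec_get_camelcase_alnum_string get_camelcase_alnum_string get_camelcase_alnum_string_alt
  simp only
  rw [main_lemma]
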